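-- pv_equiv track=rewrite | github.com/MegaGiciorPortas/WDI-Zadania | 02-tablice_jednowymiarowe/2.69.py | func
-- ===== SOURCE A (Python) =====
-- def func(a):
--     flaga = False
--     while a > 0:
--         c = a % 10
--         if c % 2 == 1:
--             flaga = True
--             break
--         a = a // 10
--     return flaga
-- ===== SOURCE B (Python) =====
-- def func(a):
--     if a <= 0:
--         return False
--     return any(int(d) % 2 for d in str(a))
-- ===== Notes on version B (the rewrite author's own statement) =====
-- stated objective: idiomatic
-- what changed: B replaces A's modulus-and-quotient digit-extraction loop with a parity test over the characters of the decimal string of a, guarding nonpositive a up front exactly as A's loop condition does.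
import Mathlib
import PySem

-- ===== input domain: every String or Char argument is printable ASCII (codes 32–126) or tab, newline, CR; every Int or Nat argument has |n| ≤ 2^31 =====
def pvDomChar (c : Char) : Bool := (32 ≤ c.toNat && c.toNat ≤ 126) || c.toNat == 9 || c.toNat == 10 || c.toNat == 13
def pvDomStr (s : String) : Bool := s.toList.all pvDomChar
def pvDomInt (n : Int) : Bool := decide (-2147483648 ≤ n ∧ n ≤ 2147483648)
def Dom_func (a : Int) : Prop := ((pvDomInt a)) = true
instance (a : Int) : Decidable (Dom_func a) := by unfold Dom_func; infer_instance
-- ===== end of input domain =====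

-- B replaces A's modulus-and-quotient digit-extraction loop with a parity test over the decimal string of a (idiomatic; no speed claim).

-- ===== PORT A =====
-- while a > 0: c = a % 10; if c % 2 == 1: flaga = True; break; a = a // 10
def funcLoop (a : Int) (flaga : Bool) : Bool :=
  if h : a > 0 then
    let c := PySem.Int.mod a 10
    if PySem.Int.mod c 2 == 1 then true
    else funcLoop (PySem.Int.floordiv a 10) flaga
  else flaga
termination_by a.toNat
decreasing_by
  simp only [PySem.Int.floordiv, Int.fdiv_eq_ediv]
  simp only [show ((0:Int) ≤ 10 ∨ (10:Int) ∣ a) from Or.inl (by norm_num), if_pos]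
  omega

def func (a : Int) : Bool := funcLoop a false

-- ===== PORT B =====
-- any(int(d) % 2 for d in str(a)); str(a) is PySem.Int.toChars a (toList_toStr), and
-- int(d) % 2 == 1 is ported exactly as (d.toNat - 48) % 2 == 1: for a > 0 every
-- character of str(a) is a decimal digit '0'..'9', where int(d) = d.toNat - 48.
def func_alt (a : Int) : Bool :=
  if a ≤ 0 then false
  else (PySem.Int.toChars a).any (fun d => (d.toNat - 48) % 2 == 1)

-- ===== PRECONDITION & SPEC =====
def Spec_func (a : Int) (out : Bool) : Prop := out = func_alt a
instance (a : Int) (out : Bool) : Decidable (Spec_func a out) := by unfold Spec_func; infer_instance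

-- ===== CLAIM (what is proved, stated in full; the proofs are below) =====
def Claim_equal_func : Prop := ∀ (a : Int), Dom_func a → Spec_func a (func a)

-- ===== LEMMAS AND PROOFS =====

-- Nat-level "has an odd decimal digit": the meeting point of the two ports.
def oddDigit (n : Nat) : Bool :=
  if n = 0 then false
  else (n % 10 % 2 == 1) || oddDigit (n / 10)
decreasing_by exact Nat.div_lt_self (by omega) (by norm_num)

lemma any_digitChar (m : Nat) (hm : m < 10) :
    (((m.digitChar).toNat - 48) % 2 == 1) = (m % 2 == 1) := by
  interval_cases m <;> decide


lemma toDigitsCore_any (f : Nat) : ∀ (n : Nat) (l : List Char), n < f →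
    (Nat.toDigitsCore 10 f n l).any (fun d => (d.toNat - 48) % 2 == 1)
      = (oddDigit n || l.any (fun d => (d.toNat - 48) % 2 == 1)) := by
  induction f with
  | zero => intro n l h; omega
  | succ f ih =>
    intro n l h
    rw [Nat.toDigitsCore]
    by_cases h0 : n / 10 = 0
    · rw [if_pos h0, List.any_cons, any_digitChar (n % 10) (Nat.mod_lt _ (by norm_num))]
      rcases Nat.eq_zero_or_pos n with hn | hn
      · subst hn; rw [oddDigit]; simp
      · have hlt10 : n < 10 := by
          by_contra hge
          exact absurd h0 (by
            have : 1 ≤ n / 10 := Nat.le_div_iff_mul_le (by norm_num) |>.2 (by omega)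
            omega)
        rw [oddDigit, if_neg (by omega), h0, oddDigit, Nat.mod_eq_of_lt hlt10]
        simp
    · have hge : 10 ≤ n := by
        by_contra hlt10
        exact h0 (Nat.div_eq_of_lt (by omega))
      have hlt : n / 10 < f := by
        have := Nat.div_lt_self (by omega : 0 < n) (by norm_num : (1:Nat) < 10)
        omega
      rw [if_neg h0, ih (n / 10) _ hlt, List.any_cons,
          any_digitChar (n % 10) (Nat.mod_lt _ (by norm_num))]
      conv_rhs => rw [oddDigit]
      rw [if_neg (show ¬ n = 0 by omega)]
      cases oddDigit (n / 10) <;> simp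

-- A's loop computes oddDigit on nonnegative input.
lemma funcLoop_eq (n : Nat) : ∀ (a : Int), 0 ≤ a → a.toNat = n → funcLoop a false = oddDigit n := by
  induction n using Nat.strong_induction_on with
  | _ n ih =>
    intro a ha hn
    rw [funcLoop, oddDigit]
    by_cases hpos : a > 0
    · have hn0 : n ≠ 0 := by omega
      rw [dif_pos hpos, if_neg hn0]
      have hmod : PySem.Int.mod (PySem.Int.mod a 10) 2 = ((n % 10 % 2 : Nat) : Int) := by
        simp only [PySem.Int.mod, Int.fmod_eq_emod]
        omega
      dsimp only
      rw [hmod]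
      by_cases hc : n % 10 % 2 = 1
      · simp [hc]
      · have hc0 : n % 10 % 2 = 0 := by omega
        have hdiv : (PySem.Int.floordiv a 10).toNat = n / 10 := by
          simp only [PySem.Int.floordiv, Int.fdiv_eq_ediv]
          simp only [show ((0:Int) ≤ 10 ∨ (10:Int) ∣ a) from Or.inl (by norm_num), if_pos]
          omega
        have hnn : (0:Int) ≤ PySem.Int.floordiv a 10 := by
          simp only [PySem.Int.floordiv, Int.fdiv_eq_ediv]
          simp only [show ((0:Int) ≤ 10 ∨ (10:Int) ∣ a) from Or.inl (by norm_num), if_pos]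
          omega
        have hrec := ih (n / 10) (by omega) (PySem.Int.floordiv a 10) hnn hdiv
        rw [hc0]
        simp only [Nat.cast_zero]
        rw [if_neg (by decide), hrec]
        simp
    · rw [dif_neg hpos, if_pos (by omega)]


-- B's string scan computes oddDigit on positive input.
lemma toChars_any (a : Int) (ha : 0 < a) :
    (PySem.Int.toChars a).any (fun d => (d.toNat - 48) % 2 == 1) = oddDigit a.toNat := by
  rw [PySem.Int.toChars, if_neg (by omega), Nat.toDigits,
      toDigitsCore_any (a.toNat + 1) a.toNat [] (by omega)]
  simp

-- ===== VERDICT =====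
theorem func_spec : Claim_equal_func := by
  intro a _
  unfold Spec_func func func_alt
  by_cases h : a ≤ 0
  · rw [if_pos h, funcLoop]
    rw [dif_neg (by omega)]
  · rw [if_neg h, toChars_any a (by omega), funcLoop_eq a.toNat a (by omega) rfl]
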